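-- pv_equiv track=rewrite | github.com/abstractlyZach/write_you_a_love_song | lyric_scraper/lyric_scraper/spiders/azlyrics_scraper.py | clean_lyrics
-- ===== SOURCE A (Python) =====
-- PARAGRAPH_BREAK = '**paragraph break**\n'
--
-- def clean_lyrics(lyrics, paragraph_break=PARAGRAPH_BREAK):
-- 	'''Cleans the lyrics text so that all that is left are the verses separated by
-- 	the paragraph break.
-- 	'''
-- 	# strip off everything below the standard page footer
-- 	footer_index = lyrics.index("Visit www.azlyrics.com for these lyrics.")
-- 	lyrics = lyrics[:footer_index]
--
-- 	# add paragraph breaks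
-- 	for index, line in enumerate(lyrics):
-- 		if line == '\n':
-- 			# only adds the paragraph break if the \n character isn't placed
-- 			#    before another \n. Happens when there are italics, like
-- 			#	 http://www.azlyrics.com/lyrics/moanacast/yourewelcome.html
-- 			if not lyrics[index + 1].isspace():
-- 				lyrics[index] = PARAGRAPH_BREAK
--
-- 	# remove the carriage returns and newlines
-- 	lyrics = [line.strip() for line in lyrics]
--
-- 	# re-add newline characters after every paragraph break
-- 	# 	the \n characters make for better printing
-- 	#	and you can search for the paragraph break to parse it out later
-- 	for index, line in enumerate(lyrics):
-- 		if line == PARAGRAPH_BREAK.strip():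
-- 			lyrics[index] += '\n'
--
-- 	# remove empty lines (mostly the ones that were cleared with the strip operation)
-- 	lyrics = [line for line in lyrics if line != '']
--
-- 	# add paragraph break to final paragraph
-- 	lyrics.append(PARAGRAPH_BREAK)
--
-- 	return lyrics
-- ===== SOURCE B (Python) =====
-- PARAGRAPH_BREAK = '**paragraph break**\n'
--
-- def clean_lyrics(lyrics, paragraph_break=PARAGRAPH_BREAK):
--     '''Single-pass version: truncate at the footer, then build the cleaned
--     list in one traversal instead of four sequential passes.'''
--     footer_index = lyrics.index("Visit www.azlyrics.com for these lyrics.")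
--     lyrics = lyrics[:footer_index]
--     out = []
--     for index, line in enumerate(lyrics):
--         if line == '\n':
--             # lookahead; IndexError when '\n' is the last kept line, as in A
--             if not lyrics[index + 1].isspace():
--                 out.append(PARAGRAPH_BREAK)
--         else:
--             stripped = line.strip()
--             if stripped == '**paragraph break**':
--                 out.append(stripped + '\n')
--             elif stripped != '':
--                 out.append(stripped)
--     out.append(PARAGRAPH_BREAK)
--     return out
-- ===== Notes on version B (the rewrite author's own statement) =====
-- stated objective: simpler
-- what changed: Replaces A's four sequential passes (in-place rewrite of '\n' lines, strip map, newline re-add map, empty filter) with a single traversal that classifies each line once and appends the cleaned value directly.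
import Mathlib
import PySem

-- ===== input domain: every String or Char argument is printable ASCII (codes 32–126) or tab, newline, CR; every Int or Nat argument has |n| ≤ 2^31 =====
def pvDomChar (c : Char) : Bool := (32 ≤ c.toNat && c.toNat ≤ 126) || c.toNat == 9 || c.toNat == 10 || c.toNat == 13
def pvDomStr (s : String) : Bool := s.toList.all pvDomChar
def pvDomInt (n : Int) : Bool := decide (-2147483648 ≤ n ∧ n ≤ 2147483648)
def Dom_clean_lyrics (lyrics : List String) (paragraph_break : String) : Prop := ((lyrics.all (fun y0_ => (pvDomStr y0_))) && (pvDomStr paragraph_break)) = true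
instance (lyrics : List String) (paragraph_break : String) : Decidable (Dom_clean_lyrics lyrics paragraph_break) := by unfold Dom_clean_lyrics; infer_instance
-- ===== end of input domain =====

-- B fuses A's four sequential passes into a single traversal (objective: simpler);
-- A mutates its local truncated copy only, callers observe no mutation of the argument.


-- shared module constants (PARAGRAPH_BREAK and the footer literal)
def pvPB : String := "**paragraph break**\n"
def pvFooter : String := "Visit www.azlyrics.com for these lyrics."

-- ===== PORT A =====
-- The Python for-loop rewrites lyrics[index] in place but only READS lyrics[index+1],
-- which is never yet mutated, so a map over enumerate of the untouched list is exact.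
-- lyrics[index+1] raises IndexError when out of range (pyGet? = none); Pre_ excludes that,
-- as it excludes the ValueError of .index (getD 0 is unreachable inside Pre_).
def clean_lyrics (lyrics : List String) (paragraph_break : String) : List String :=
  let footer_index : Nat := (PySem.List.index? lyrics pvFooter).getD 0
  let t := PySem.List.slice lyrics none (some (footer_index : Int))
  let t2 := (PySem.List.enumerate t 0).map (fun p =>
      if p.2 = "\n" then
        if ¬ (PySem.Str.strIsspace ((PySem.List.pyGet? t (p.1 + 1)).getD "")) then pvPB else p.2
      else p.2)
  let t3 := t2.map PySem.Str.strip
  let t4 := (PySem.List.enumerate t3 0).map (fun p =>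
      if p.2 = PySem.Str.strip pvPB then p.2 ++ "\n" else p.2)
  let t5 := t4.filter (fun line => line ≠ "")
  t5 ++ [pvPB]

-- ===== PORT B =====
-- single traversal of the truncated list; lookahead lyrics[index+1] is the head of the
-- tail (IndexError on the last element is excluded by Pre_, headD "" is unreachable there)
def cleanGo : List String → List String
  | [] => []
  | line :: rest =>
    if line = "\n" then
      if ¬ (PySem.Str.strIsspace (rest.headD "")) then pvPB :: cleanGo rest else cleanGo rest
    else
      let stripped := PySem.Str.strip line
      if stripped = "**paragraph break**" then (stripped ++ "\n") :: cleanGo rest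
      else if stripped ≠ "" then stripped :: cleanGo rest
      else cleanGo rest

def clean_lyrics_alt (lyrics : List String) (paragraph_break : String) : List String :=
  let footer_index : Nat := (PySem.List.index? lyrics pvFooter).getD 0
  cleanGo (PySem.List.slice lyrics none (some (footer_index : Int))) ++ [pvPB]

-- ===== PRECONDITION & SPEC =====
-- Pre_ excludes exactly the inputs where Python A raises: ValueError when the footer line
-- is absent, and IndexError when the last line before the footer is '\n' (the lookahead).
def Pre_clean_lyrics (lyrics : List String) (paragraph_break : String) : Prop :=
  (match PySem.List.index? lyrics pvFooter with
   | none => false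
   | some k => (lyrics.take k).getLast? != some "\n") = true
instance (lyrics : List String) (paragraph_break : String) : Decidable (Pre_clean_lyrics lyrics paragraph_break) := by unfold Pre_clean_lyrics; infer_instance

def pvWitness_clean_lyrics : List String × String :=
  (["Hello\n", "\n", "world\n", "Visit www.azlyrics.com for these lyrics."], "**paragraph break**\n")

def Spec_clean_lyrics (lyrics : List String) (paragraph_break : String) (out : List String) : Prop := out = clean_lyrics_alt lyrics paragraph_break
instance (lyrics : List String) (paragraph_break : String) (out : List String) : Decidable (Spec_clean_lyrics lyrics paragraph_break out) := by unfold Spec_clean_lyrics; infer_instance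

-- ===== CLAIM (what is proved, stated in full; the proofs are below) =====
def Claim_equal_clean_lyrics : Prop := ∀ (lyrics : List String) (paragraph_break : String), Dom_clean_lyrics lyrics paragraph_break → Pre_clean_lyrics lyrics paragraph_break → Spec_clean_lyrics lyrics paragraph_break (clean_lyrics lyrics paragraph_break)

-- ===== LEMMAS AND PROOFS =====

-- A's first pass, written structurally (lookahead of element j of r inside pre ++ r)
def pass1rec : List String → List String
  | [] => []
  | a :: r =>
    (if a = "\n" then
      (if ¬ (PySem.Str.strIsspace (r.headD "")) then pvPB else a)
     else a) :: pass1rec r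

theorem pass1_eq_rec (r pre : List String) :
    (PySem.List.enumerate r (pre.length : Int)).map (fun p =>
      if p.2 = "\n" then
        if ¬ (PySem.Str.strIsspace ((PySem.List.pyGet? (pre ++ r) (p.1 + 1)).getD "")) then pvPB else p.2
      else p.2) = pass1rec r := by
  induction r generalizing pre with
  | nil => simp [pass1rec, PySem.List.enumerate_nil]
  | cons a rest ih =>
    rw [PySem.List.enumerate_cons, List.map_cons]
    have hget : PySem.List.pyGet? (pre ++ a :: rest) ((pre.length : Int) + 1)
        = rest[0]? := by
      have := PySem.List.pyGet?_append_right (pre := pre) (ys := a :: rest) (k := 1)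
      simpa using this
    have htail :
        (PySem.List.enumerate rest ((pre.length : Int) + 1)).map (fun p =>
          if p.2 = "\n" then
            if ¬ (PySem.Str.strIsspace ((PySem.List.pyGet? (pre ++ a :: rest) (p.1 + 1)).getD "")) then pvPB else p.2
          else p.2) = pass1rec rest := by
      have h := ih (pre := pre ++ [a])
      simpa [List.append_assoc] using h
    rw [pass1rec, htail, hget]
    cases rest <;> rfl

theorem pass1_eq_rec0 (t : List String) :
    (PySem.List.enumerate t 0).map (fun p =>
      if p.2 = "\n" then
        if ¬ (PySem.Str.strIsspace ((PySem.List.pyGet? t (p.1 + 1)).getD "")) then pvPB else p.2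
      else p.2) = pass1rec t := by
  have h := pass1_eq_rec t []
  simpa using h

theorem enum_map_pass2 (l : List String) (s : Int) :
    (PySem.List.enumerate l s).map (fun p =>
      if p.2 = PySem.Str.strip pvPB then p.2 ++ "\n" else p.2)
    = l.map (fun x => if x = PySem.Str.strip pvPB then x ++ "\n" else x) := by
  induction l generalizing s with
  | nil => simp [PySem.List.enumerate_nil]
  | cons a r ih => rw [PySem.List.enumerate_cons]; simp [ih]

theorem chain_eq (t : List String) :
    List.filter (fun line => line ≠ "")
      ((List.map PySem.Str.strip (pass1rec t)).map
        (fun x => if x = "**paragraph break**" then x ++ "\n" else x)) = cleanGo t := by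
  have hstrip : PySem.Str.strip pvPB = "**paragraph break**" := by decide
  have hnl : PySem.Str.strip "\n" = "" := by decide
  induction t with
  | nil => rfl
  | cons a r ih =>
    rw [pass1rec, cleanGo, List.map_cons, List.map_cons, List.filter_cons]
    by_cases ha : a = "\n"
    · subst ha
      rw [if_pos rfl, if_pos rfl]
      by_cases hs : PySem.Str.strIsspace (r.headD "") = true
      · rw [if_neg (not_not_intro hs), if_neg (not_not_intro hs), hnl,
          if_neg (show ¬ (("" : String) = "**paragraph break**") by decide)]
        rw [if_neg (by decide)]
        exact ih
      · rw [if_pos hs, if_pos hs, hstrip, if_pos rfl]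
        rw [if_pos (by decide),
          show ("**paragraph break**" : String) ++ "\n" = pvPB by decide, ih]
    · rw [if_neg ha, if_neg ha]
      by_cases hpb : PySem.Str.strip a = "**paragraph break**"
      · rw [hpb, if_pos rfl, if_pos rfl, if_pos (by decide), ih]
      · rw [if_neg hpb, if_neg hpb]
        by_cases he : PySem.Str.strip a = ""
        · rw [he, if_neg (by decide)]
          exact ih
        · rw [if_pos he, if_pos (by simpa using he), ih]

-- ===== VERDICT (by name: the statement is the Claim_ definition above) =====
theorem clean_lyrics_spec : Claim_equal_clean_lyrics := by
  intro lyrics paragraph_break _ _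
  unfold Spec_clean_lyrics clean_lyrics clean_lyrics_alt
  dsimp only
  rw [pass1_eq_rec0, enum_map_pass2,
    show PySem.Str.strip pvPB = "**paragraph break**" by decide, chain_eq]
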